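-- pv_equiv track=rewrite | github.com/ZosiaZamoyska/algorithms | solutions/introduction/Maximum Subarray Sum/BestTrip.py | best_trip
-- ===== SOURCE A (Python) =====
-- def best_trip(n, arr):
--     pref, maxpref = 0, 0
--     suf, maxsuf = 0, 0
--
--     for i in range(n-1):
--         pref += arr[i]
--         maxpref = max(maxpref, pref)
--
--     for i in range(n-2, -1, -1):
--         suf += arr[i]
--         maxsuf = max(maxsuf, suf)
--
--     return maxpref + maxsuf
-- ===== SOURCE B (Python) =====
-- def best_trip(n, arr):
--     # Single forward pass: track running prefix sum, its max, and the min
--     # prefix value seen before each step; any suffix sum of arr[0:n-1]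
--     # equals total - (an earlier prefix), so maxsuf = max(total - minpref, 0).
--     pref = 0
--     maxpref = 0
--     minpref = 0
--     for i in range(n - 1):
--         minpref = min(minpref, pref)
--         pref += arr[i]
--         maxpref = max(maxpref, pref)
--     return maxpref + max(pref - minpref, 0)
-- ===== Notes on version B (the rewrite author's own statement) =====
-- stated objective: alternative
-- what changed: Replaced A's two passes (forward max-prefix loop plus a separate backward max-suffix loop) by one forward pass that also tracks the minimum earlier prefix sum, recovering the max suffix as max(total - minpref, 0).
import Mathlib
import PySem

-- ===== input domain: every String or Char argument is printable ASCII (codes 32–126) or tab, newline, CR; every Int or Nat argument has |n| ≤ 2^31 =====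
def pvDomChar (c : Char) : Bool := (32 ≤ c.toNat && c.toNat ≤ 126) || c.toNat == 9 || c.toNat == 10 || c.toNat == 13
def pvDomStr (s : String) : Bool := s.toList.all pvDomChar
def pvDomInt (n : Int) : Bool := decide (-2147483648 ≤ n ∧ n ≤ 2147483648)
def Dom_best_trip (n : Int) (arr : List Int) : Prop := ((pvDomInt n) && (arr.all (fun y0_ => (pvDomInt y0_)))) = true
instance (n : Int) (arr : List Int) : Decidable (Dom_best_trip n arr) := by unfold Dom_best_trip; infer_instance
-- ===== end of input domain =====

-- B replaces A's forward+backward double pass by a single forward pass that also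
-- tracks the minimum earlier prefix sum (max suffix = max(total - minpref, 0)).

-- ===== PORT A =====
def best_trip (n : Int) (arr : List Int) : Int :=
  let s1 := (PySem.List.pyRange 0 (n - 1) 1).foldl
    (fun (st : Int × Int) i =>
      let pref := st.1 + PySem.List.pyGetD arr i 0
      (pref, max st.2 pref)) (0, 0)
  let s2 := (PySem.List.pyRange (n - 2) (-1) (-1)).foldl
    (fun (st : Int × Int) i =>
      let suf := st.1 + PySem.List.pyGetD arr i 0
      (suf, max st.2 suf)) (0, 0)
  s1.2 + s2.2

-- ===== PORT B =====
def best_trip_alt (n : Int) (arr : List Int) : Int :=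
  let st := (PySem.List.pyRange 0 (n - 1) 1).foldl
    (fun (st : Int × Int × Int) i =>
      let minpref := min st.2.2 st.1
      let pref := st.1 + PySem.List.pyGetD arr i 0
      let maxpref := max st.2.1 pref
      (pref, maxpref, minpref)) (0, 0, 0)
  st.2.1 + max (st.1 - st.2.2) 0

-- ===== PRECONDITION & SPEC =====
-- A indexes arr[0..n-2]; it raises IndexError iff n - 1 > len(arr).
def Pre_best_trip (n : Int) (arr : List Int) : Prop := n - 1 ≤ (arr.length : Int)
instance (n : Int) (arr : List Int) : Decidable (Pre_best_trip n arr) := by unfold Pre_best_trip; infer_instance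
def pvWitness_best_trip : Int × List Int := (3, [1, -2, 3])

def Spec_best_trip (n : Int) (arr : List Int) (out : Int) : Prop := out = best_trip_alt n arr
instance (n : Int) (arr : List Int) (out : Int) : Decidable (Spec_best_trip n arr out) := by unfold Spec_best_trip; infer_instance

-- ===== CLAIM (what is proved, stated in full; the proofs are below) =====
def Claim_equal_best_trip : Prop := ∀ (n : Int) (arr : List Int), Dom_best_trip n arr → Pre_best_trip n arr → Spec_best_trip n arr (best_trip n arr)

-- ===== LEMMAS AND PROOFS =====

-- A's loop step on the value level (pref, maxpref)
def pvPstep (st : Int × Int) (x : Int) : Int × Int := (st.1 + x, max st.2 (st.1 + x))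
-- the (pref, minpref) part of B's loop
def pvMstep (st : Int × Int) (x : Int) : Int × Int := (st.1 + x, min st.2 st.1)
-- B's loop step on the value level (pref, maxpref, minpref)
def pvBstep (st : Int × Int × Int) (x : Int) : Int × Int × Int :=
  (st.1 + x, max st.2.1 (st.1 + x), min st.2.2 st.1)
def pvMn (xs : List Int) : Int := (xs.foldl pvMstep (0, 0)).2

theorem pvPstep_fst (xs : List Int) (p m : Int) : (xs.foldl pvPstep (p, m)).1 = p + xs.sum := by
  induction xs generalizing p m with
  | nil => simp
  | cons x t ih => simp [pvPstep, ih]; ring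

theorem pvMstep_off (xs : List Int) (p m : Int) (h : xs ≠ []) :
    xs.foldl pvMstep (p, m) = (p + xs.sum, min m (p + pvMn xs)) := by
  induction xs generalizing p m with
  | nil => exact absurd rfl h
  | cons x t ih =>
    by_cases ht : t = []
    · subst ht; simp [pvMstep, pvMn]
    · have h1 := ih (p + x) (min m p) ht
      have h2 := ih x 0 ht
      simp only [List.foldl_cons, pvMstep, pvMn, zero_add, min_self] at *
      rw [h1, h2]
      simp only [Prod.mk.injEq, List.sum_cons]
      refine ⟨by ring, by omega⟩

theorem pvMn_cons (x : Int) (t : List Int) (ht : t ≠ []) : pvMn (x :: t) = min 0 (x + pvMn t) := by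
  simp only [pvMn, List.foldl_cons, pvMstep, zero_add, min_self]
  rw [pvMstep_off t x 0 ht]
  simp [pvMn]

theorem pvMn_nonpos (xs : List Int) : pvMn xs ≤ 0 := by
  cases xs with
  | nil => simp [pvMn]
  | cons y t =>
    by_cases ht : t = []
    · subst ht; simp [pvMn, pvMstep]
    · rw [pvMn_cons y t ht]; omega

-- B's triple fold decomposes into the pair folds
theorem pvB_decomp (xs : List Int) (p mx mn : Int) :
    xs.foldl pvBstep (p, mx, mn)
      = ((xs.foldl pvPstep (p, mx)).1, (xs.foldl pvPstep (p, mx)).2,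
         (xs.foldl pvMstep (p, mn)).2) := by
  induction xs generalizing p mx mn with
  | nil => rfl
  | cons x t ih => simp only [List.foldl_cons, pvBstep, pvPstep, pvMstep]; exact ih _ _ _

-- max suffix sum of xs = max(0, sum - min earlier prefix)
theorem pvKey (xs : List Int) :
    ((xs.reverse).foldl pvPstep (0, 0)).2 = max 0 (xs.sum - pvMn xs) := by
  induction xs with
  | nil => simp [pvMn]
  | cons x t ih =>
    have hrev : (x :: t).reverse = t.reverse ++ [x] := by simp
    rw [hrev, List.foldl_append]
    have hfst : (t.reverse.foldl pvPstep (0, 0)).1 = t.sum := by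
      rw [pvPstep_fst]; simp
    by_cases ht : t = []
    · subst ht; simp [pvPstep, pvMn, pvMstep]
    · rw [pvMn_cons x t ht]
      simp only [List.foldl_cons, List.foldl_nil, pvPstep, hfst, ih, List.sum_cons]
      omega

theorem best_trip_spec : Claim_equal_best_trip := by
  intro n arr _hdom hpre
  unfold Spec_best_trip best_trip best_trip_alt
  by_cases hn : n - 1 ≤ 0
  · rw [PySem.List.pyRange_one_eq_nil hn, PySem.List.pyRange_neg_one_eq_nil (by omega)]
    simp
  · have hpre' : n - 1 ≤ (arr.length : Int) := hpre
    set m : Nat := (n - 1).toNat with hm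
    have hmlen : m ≤ arr.length := by omega
    set xs : List Int := arr.take m with hxs
    have hxslen : (xs.length : Int) = n - 1 := by
      simp [hxs, Nat.min_eq_left hmlen]; omega
    have hg : ∀ i ∈ PySem.List.pyRange 0 (n - 1) 1,
        PySem.List.pyGetD arr i 0 = PySem.List.pyGetD xs i 0 := by
      intro i hi
      rw [PySem.List.mem_pyRange_one] at hi
      have hilt : i.toNat < m := by omega
      rw [PySem.List.pyGetD_eq_getElem arr 0 hi.1 (by omega),
          PySem.List.pyGetD_eq_getElem xs 0 hi.1 (by omega)]
      simp [hxs]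
    have hmapxs : (PySem.List.pyRange 0 (n - 1) 1).map (fun i => PySem.List.pyGetD xs i 0) = xs := by
      have h0 := PySem.List.map_pyGetD_pyRange_zero xs 0
      rw [PySem.List.len_eq, hxslen] at h0
      exact h0
    have hR2 : PySem.List.pyRange (n - 2) (-1) (-1)
        = (PySem.List.pyRange 0 (n - 1) 1).reverse := by
      have h := PySem.List.pyRange_neg_one_eq_reverse (n - 2) (-1)
      have e1 : (-1 : Int) + 1 = 0 := by omega
      have e2 : n - 2 + 1 = n - 1 := by omega
      rw [e1, e2] at h
      exact h
    have hA1 : (PySem.List.pyRange 0 (n - 1) 1).foldl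
        (fun (st : Int × Int) i =>
          let pref := st.1 + PySem.List.pyGetD arr i 0
          (pref, max st.2 pref)) (0, 0)
        = xs.foldl pvPstep (0, 0) := by
      rw [PySem.List.foldl_congr_mem _ _
          (fun (st : Int × Int) i => pvPstep st (PySem.List.pyGetD xs i 0)) _
          (fun st i hi => by simp only [pvPstep, hg i hi])]
      rw [← List.foldl_map (f := fun i => PySem.List.pyGetD xs i 0) (g := pvPstep)]
      rw [hmapxs]
    have hA2 : (PySem.List.pyRange (n - 2) (-1) (-1)).foldl
        (fun (st : Int × Int) i =>
          let suf := st.1 + PySem.List.pyGetD arr i 0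
          (suf, max st.2 suf)) (0, 0)
        = (xs.reverse).foldl pvPstep (0, 0) := by
      rw [hR2]
      rw [PySem.List.foldl_congr_mem _ _
          (fun (st : Int × Int) i => pvPstep st (PySem.List.pyGetD xs i 0)) _
          (fun st i hi => by simp only [pvPstep, hg i (by simpa using hi)])]
      rw [← List.foldl_map (f := fun i => PySem.List.pyGetD xs i 0) (g := pvPstep)]
      rw [List.map_reverse, hmapxs]
    have hB : (PySem.List.pyRange 0 (n - 1) 1).foldl
        (fun (st : Int × Int × Int) i =>
          let minpref := min st.2.2 st.1
          let pref := st.1 + PySem.List.pyGetD arr i 0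
          let maxpref := max st.2.1 pref
          (pref, maxpref, minpref)) (0, 0, 0)
        = ((xs.foldl pvPstep (0, 0)).1, (xs.foldl pvPstep (0, 0)).2,
           (xs.foldl pvMstep (0, 0)).2) := by
      rw [PySem.List.foldl_congr_mem _ _
          (fun (st : Int × Int × Int) i => pvBstep st (PySem.List.pyGetD xs i 0)) _
          (fun st i hi => by simp only [pvBstep, hg i hi])]
      rw [← List.foldl_map (f := fun i => PySem.List.pyGetD xs i 0) (g := pvBstep)]
      rw [hmapxs]
      exact pvB_decomp xs 0 0 0
    simp only [hA1, hA2, hB]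
    rw [pvKey xs, pvPstep_fst]
    have hmn : pvMn xs ≤ 0 := pvMn_nonpos xs
    simp only [pvMn] at hmn ⊢
    omega
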